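-- pv_equiv track=rewrite | github.com/chpollin/FemPrompt_SozArb | analysis/summarize-documents.py | extract_clean_summary
-- ===== SOURCE A (Python) =====
-- def extract_clean_summary(text: str) -> str:
--     """Extrahiert nur die Zusammenfassung ohne Meta-Kommentare"""
--     lines = text.split('\n')
--
--     # Finde den Start der eigentlichen Zusammenfassung
--     start_idx = 0
--     for i, line in enumerate(lines):
--         if line.strip().startswith('## Overview'):
--             start_idx = i
--             break
--
--     # Entferne Meta-Kommentare am Ende
--     end_idx = len(lines)
--     for i in range(len(lines) - 1, -1, -1):
--         if any(phrase in lines[i].lower() for phrase in [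
--             'no revisions', 'comprehensive', 'well-structured', 'final version'
--         ]):
--             end_idx = i
--             break
--
--     return '\n'.join(lines[start_idx:end_idx]).strip()
-- ===== SOURCE B (Python) =====
-- META_PHRASES = ['no revisions', 'comprehensive', 'well-structured', 'final version']
--
-- def extract_clean_summary(text: str) -> str:
--     """Extrahiert nur die Zusammenfassung ohne Meta-Kommentare"""
--     lines = text.split('\n')
--     start_idx = 0
--     seen_overview = False
--     last_meta = None
--     for i, line in enumerate(lines):
--         if not seen_overview and line.strip().startswith('## Overview'):
--             start_idx = i
--             seen_overview = True
--         low = line.lower()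
--         if any(phrase in low for phrase in META_PHRASES):
--             last_meta = i
--     end_idx = len(lines) if last_meta is None else last_meta
--     return '\n'.join(lines[start_idx:end_idx]).strip()
-- ===== Notes on version B (the rewrite author's own statement) =====
-- stated objective: alternative
-- what changed: Replaced A's two separate scans (a forward scan for the '## Overview' start and a backward index scan over range(len-1,-1,-1) for the meta end) by a single forward pass over enumerate(lines) that tracks a seen-flag for the start and the last meta-matching index for the end.
import Mathlib
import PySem

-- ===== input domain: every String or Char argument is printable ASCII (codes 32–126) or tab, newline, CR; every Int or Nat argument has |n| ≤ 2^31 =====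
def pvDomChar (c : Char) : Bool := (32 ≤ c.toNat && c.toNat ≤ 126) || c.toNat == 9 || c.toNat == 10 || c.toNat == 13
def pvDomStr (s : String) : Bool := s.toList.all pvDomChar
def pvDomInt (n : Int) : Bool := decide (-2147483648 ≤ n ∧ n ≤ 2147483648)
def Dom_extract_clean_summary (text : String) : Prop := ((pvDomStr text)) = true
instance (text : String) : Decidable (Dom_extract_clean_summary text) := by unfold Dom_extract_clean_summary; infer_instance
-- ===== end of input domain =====

-- B replaces A's forward + backward two-scan structure by one forward pass tracking the
-- first '## Overview' index and the last meta-phrase index (objective: alternative decomposition).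

-- ===== PORT A =====
def pvAMetaPhrases : List String := ["no revisions", "comprehensive", "well-structured", "final version"]

def pvAIsMeta (line : String) : Bool :=
  pvAMetaPhrases.any (fun p => PySem.Str.isIn p (PySem.Str.lower line))

-- for i, line in enumerate(lines): if line.strip().startswith('## Overview'): start_idx = i; break
def pvAStart : List (Int × String) → Int
  | [] => 0
  | (i, line) :: rest =>
    if PySem.Str.startswith (PySem.Str.strip line) "## Overview" then i else pvAStart rest

-- for i in range(len(lines)-1, -1, -1): if any(...): end_idx = i; break
def pvAEndLoop (lines : List String) : List Int → Int
  | [] => (lines.length : Int)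
  | i :: rest => if pvAIsMeta (PySem.List.pyGetD lines i "") then i else pvAEndLoop lines rest

def extract_clean_summary (text : String) : String :=
  let lines := (PySem.Str.split? text "\n").getD []
  let start_idx := pvAStart (PySem.List.enumerate lines)
  let end_idx := pvAEndLoop lines (PySem.List.pyRange ((lines.length : Int) - 1) (-1) (-1))
  PySem.Str.strip (PySem.Str.join "\n" (PySem.List.slice lines (some start_idx) (some end_idx)))

-- ===== PORT B =====
def pvBMetaPhrases : List String := ["no revisions", "comprehensive", "well-structured", "final version"]

-- one forward pass: (seen_overview, start_idx, last_meta)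
def pvBScan : List (Int × String) → Bool → Int → Option Int → Int × Option Int
  | [], _, start, last => (start, last)
  | (i, line) :: rest, seen, start, last =>
    let p := if !seen && PySem.Str.startswith (PySem.Str.strip line) "## Overview"
             then (true, i) else (seen, start)
    let low := PySem.Str.lower line
    let last' := if pvBMetaPhrases.any (fun ph => PySem.Str.isIn ph low) then some i else last
    pvBScan rest p.1 p.2 last'

def extract_clean_summary_alt (text : String) : String :=
  let lines := (PySem.Str.split? text "\n").getD []
  let r := pvBScan (PySem.List.enumerate lines) false 0 none
  let end_idx := match r.2 with | none => (lines.length : Int) | some i => i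
  PySem.Str.strip (PySem.Str.join "\n" (PySem.List.slice lines (some r.1) (some end_idx)))

-- ===== PRECONDITION & SPEC =====
def Spec_extract_clean_summary (text : String) (out : String) : Prop := out = extract_clean_summary_alt text
instance (text : String) (out : String) : Decidable (Spec_extract_clean_summary text out) := by unfold Spec_extract_clean_summary; infer_instance

-- ===== CLAIM (what is proved, stated in full; the proofs are below) =====
def Claim_equal_extract_clean_summary : Prop := ∀ (text : String), Dom_extract_clean_summary text → Spec_extract_clean_summary text (extract_clean_summary text)

-- ===== LEMMAS AND PROOFS =====

-- the "last meta index" accumulator, isolated as a fold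
def pvLastFold (es : List (Int × String)) (acc : Option Int) : Option Int :=
  es.foldl (fun a p => if pvAIsMeta p.2 then some p.1 else a) acc

theorem pvBScan_fst_seen (es : List (Int × String)) (start : Int) (last : Option Int) :
    (pvBScan es true start last).1 = start := by
  induction es generalizing last with
  | nil => rfl
  | cons e rest ih => cases e; simp [pvBScan, ih]

theorem pvBScan_fst (es : List (Int × String)) (last : Option Int) :
    (pvBScan es false 0 last).1 = pvAStart es := by
  induction es generalizing last with
  | nil => rfl
  | cons e rest ih =>
    cases e with
    | mk i line =>
      cases h : PySem.Str.startswith (PySem.Str.strip line) "## Overview" with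
      | true =>
        simp only [pvBScan, pvAStart, h, Bool.not_false, Bool.true_and]
        exact pvBScan_fst_seen _ _ _
      | false =>
        simp only [pvBScan, pvAStart, h, Bool.not_false, Bool.true_and]
        exact ih _

theorem pvBScan_snd (es : List (Int × String)) (seen : Bool) (start : Int) (last : Option Int) :
    (pvBScan es seen start last).2 = pvLastFold es last := by
  induction es generalizing seen start last with
  | nil => rfl
  | cons e rest ih =>
    cases e with
    | mk i line =>
      simp only [pvBScan, pvLastFold, List.foldl_cons]
      show _ = pvLastFold rest _
      rw [ih]
      rfl

theorem pvAEnd_eq (L : List String) (m : Nat) (hm : m ≤ L.length) :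
    pvAEndLoop L (PySem.List.pyRange ((m : Int) - 1) (-1) (-1))
      = (match pvLastFold (PySem.List.enumerate (L.take m)) none with
         | none => (L.length : Int) | some i => i) := by
  induction m with
  | zero =>
    rw [PySem.List.pyRange_neg_one_eq_nil (by omega)]
    simp [pvAEndLoop, pvLastFold]
  | succ m ih =>
    have hmL : m < L.length := by omega
    rw [show ((m + 1 : Nat) : Int) - 1 = (m : Int) by push_cast; ring,
        PySem.List.pyRange_neg_one_cons (by omega : (-1 : Int) < (m : Int))]
    have htake : L.take (m + 1) = L.take m ++ [L[m]] := List.take_succ_eq_append_getElem hmL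
    rw [htake]
    have henum : PySem.List.enumerate (L.take m ++ [L[m]])
        = PySem.List.enumerate (L.take m) ++ [((m : Int), L[m])] := by
      rw [PySem.List.enumerate_append]
      simp [PySem.List.enumerate, List.length_take, Nat.min_eq_left (le_of_lt hmL)]
    rw [henum]
    have hfold : pvLastFold (PySem.List.enumerate (L.take m) ++ [((m : Int), L[m])]) none
        = (if pvAIsMeta L[m] then some (m : Int) else pvLastFold (PySem.List.enumerate (L.take m)) none) := by
      simp [pvLastFold, List.foldl_append]
    have hget : PySem.List.pyGetD L (m : Int) "" = L[m] := by
      simp [PySem.List.pyGetD_natCast, List.getD_eq_getElem?_getD, hmL]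
    rw [hfold]
    simp only [pvAEndLoop, hget]
    by_cases h : pvAIsMeta L[m] = true
    · simp [h]
    · simp [h, ih (by omega)]

-- ===== VERDICT (by name: the statement is the Claim_ definition above) =====
theorem extract_clean_summary_spec : Claim_equal_extract_clean_summary := by
  intro text _
  unfold Spec_extract_clean_summary extract_clean_summary extract_clean_summary_alt
  simp only
  rw [pvBScan_fst, pvBScan_snd,
      pvAEnd_eq ((PySem.Str.split? text "\n").getD []) ((PySem.Str.split? text "\n").getD []).length le_rfl,
      List.take_length]
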